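-- pv_equiv track=rewrite | github.com/shea-parkes/advent-of-code | advent2022/day3/day3.py | get_group_priority
-- ===== SOURCE A (Python) =====
-- import string
--
-- priority = {letter: index + 1 for index, letter in enumerate(string.ascii_letters)}
--
-- def get_group_priority(rucksacks):
--     """Get priority of the set of rucksacks"""
--     overlap = None
--     for rucksack in rucksacks:
--         if overlap is None:
--             overlap = set(rucksack)
--         else:
--             overlap = overlap & set(rucksack)
--
--     assert len(overlap) == 1
--     return priority[overlap.pop()]
-- ===== SOURCE B (Python) =====
-- import string
--
-- priority = {letter: index + 1 for index, letter in enumerate(string.ascii_letters)}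
--
--
-- def get_group_priority(rucksacks):
--     """Get priority of the set of rucksacks"""
--     groups = list(rucksacks)
--     first = groups[0] if groups else ""
--     common = [c for i, c in enumerate(first)
--               if c not in first[:i] and all(c in sack for sack in groups)]
--     assert len(common) == 1
--     return priority[common[0]]
-- ===== Notes on version B (the rewrite author's own statement) =====
-- stated objective: simpler
-- what changed: Instead of folding set intersections over all rucksacks, B scans the distinct characters of the first rucksack once and keeps those contained in every rucksack via substring membership, with no set objects built at all.
import Mathlib
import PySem

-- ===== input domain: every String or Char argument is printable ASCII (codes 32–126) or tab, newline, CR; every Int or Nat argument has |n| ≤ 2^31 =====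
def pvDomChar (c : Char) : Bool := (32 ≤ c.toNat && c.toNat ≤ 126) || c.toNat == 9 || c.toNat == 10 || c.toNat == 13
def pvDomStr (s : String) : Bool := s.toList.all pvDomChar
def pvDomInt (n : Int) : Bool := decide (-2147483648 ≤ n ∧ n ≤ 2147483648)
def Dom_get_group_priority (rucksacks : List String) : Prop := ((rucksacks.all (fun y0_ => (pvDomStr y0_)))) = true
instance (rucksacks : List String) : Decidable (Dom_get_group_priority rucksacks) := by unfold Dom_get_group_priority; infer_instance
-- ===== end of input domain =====

-- B replaces A's running set-intersection fold by one filtering pass over the first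
-- rucksack's distinct characters, testing membership in every rucksack (objective: simpler).

-- module-level: priority = {letter: index + 1 for index, letter in enumerate(string.ascii_letters)}
def pvAsciiLetters : List Char :=
  "abcdefghijklmnopqrstuvwxyzABCDEFGHIJKLMNOPQRSTUVWXYZ".toList

def pvPriority : PySem.Dict Char Int :=
  (PySem.List.enumerate pvAsciiLetters 0).foldl
    (fun d p => d.insert p.2 (p.1 + 1)) PySem.Dict.empty

-- ===== PORT A =====
def get_group_priority (rucksacks : List String) : Int :=
  let overlap : Option (PySem.Set Char) := rucksacks.foldl
    (fun (ov : Option (PySem.Set Char)) r =>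
      match ov with
      | none => some (PySem.Set.ofList r.toList)
      | some s => some (PySem.Set.inter s (PySem.Set.ofList r.toList))) none
  match overlap with
  | none => 0                      -- Python: TypeError on len(None); excluded by Pre_
  | some s =>
    if PySem.Set.len s = 1 then    -- assert len(overlap) == 1 (AssertionError excluded by Pre_)
      match s with
      | c :: _ => pvPriority.getD c 0   -- overlap.pop() of the singleton; KeyError excluded by Pre_
      | [] => 0
    else 0

-- ===== PORT B =====
def get_group_priority_alt (rucksacks : List String) : Int :=
  let groups := rucksacks
  let first : List Char := (groups.headD "").toList
  let common : List Char :=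
    ((PySem.List.enumerate first 0).filter
      (fun p => !((PySem.List.slice first none (some p.1)).contains p.2) &&
                groups.all (fun sack => sack.toList.contains p.2))).map (·.2)
  if common.length = 1 then
    match common with
    | c :: _ => pvPriority.getD c 0
    | [] => 0
  else 0

-- ===== PRECONDITION & SPEC =====
-- Pre_ excludes exactly the inputs on which Python A raises: the empty list (TypeError),
-- inputs whose rucksacks share not exactly one distinct character (AssertionError), and
-- a shared character that is not an ASCII letter (KeyError).
def Pre_get_group_priority (rucksacks : List String) : Prop :=
  rucksacks ≠ [] ∧
  (let cs := (PySem.List.dedup (rucksacks.headD "").toList).filter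
      (fun c => rucksacks.all (fun r => r.toList.contains c));
   cs.length = 1 ∧ cs.headD ' ' ∈ pvAsciiLetters)
instance (rucksacks : List String) : Decidable (Pre_get_group_priority rucksacks) := by
  unfold Pre_get_group_priority; infer_instance

def pvWitness_get_group_priority : List String := ["ab", "ac"]

def Spec_get_group_priority (rucksacks : List String) (out : Int) : Prop := out = get_group_priority_alt rucksacks
instance (rucksacks : List String) (out : Int) : Decidable (Spec_get_group_priority rucksacks out) := by unfold Spec_get_group_priority; infer_instance

-- ===== CLAIM (what is proved, stated in full; the proofs are below) =====
def Claim_equal_get_group_priority : Prop := ∀ (rucksacks : List String), Dom_get_group_priority rucksacks → Pre_get_group_priority rucksacks → Spec_get_group_priority rucksacks (get_group_priority rucksacks)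

-- ===== LEMMAS AND PROOFS =====

-- A's fold, after the first rucksack seeds the accumulator, is a fold of intersections.
lemma pvFoldA (rest : List String) (s : PySem.Set Char) :
    rest.foldl
      (fun (ov : Option (PySem.Set Char)) r =>
        match ov with
        | none => some (PySem.Set.ofList r.toList)
        | some t => some (PySem.Set.inter t (PySem.Set.ofList r.toList))) (some s)
    = some (rest.foldl (fun t r => PySem.Set.inter t (PySem.Set.ofList r.toList)) s) := by
  induction rest generalizing s with
  | nil => rfl
  | cons r rs ih => simp [List.foldl_cons, ih]

lemma pvMemFoldInter (rest : List String) (s : PySem.Set Char) (x : Char) :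
    x ∈ rest.foldl (fun t r => PySem.Set.inter t (PySem.Set.ofList r.toList)) s
      ↔ x ∈ s ∧ ∀ r ∈ rest, x ∈ r.toList := by
  induction rest generalizing s with
  | nil => simp
  | cons r rs ih =>
    simp [List.foldl_cons, ih, PySem.Set.mem_inter, PySem.Set.mem_ofList]
    tauto

lemma pvNodupFoldInter (rest : List String) (s : PySem.Set Char) (hs : s.Nodup) :
    (rest.foldl (fun t r => PySem.Set.inter t (PySem.Set.ofList r.toList)) s).Nodup := by
  induction rest generalizing s with
  | nil => exact hs
  | cons r rs ih => exact ih _ (PySem.Set.nodup_inter _ _ hs)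

lemma pvNodupSingleton {α : Type} (l : List α) (c : α) (hl : l.Nodup)
    (h : ∀ x, x ∈ l ↔ x = c) : l = [c] := by
  match l with
  | [] => exact absurd ((h c).mpr rfl) (by simp)
  | [a] => simp [show a = c from (h a).mp (by simp)]
  | a :: b :: t =>
    have ha : a = c := (h a).mp (by simp)
    have hb : b = c := (h b).mp (by simp)
    simp [ha, hb] at hl

-- B's filtered enumeration is the filter of the ordered dedup of the first rucksack.
lemma pvCommonB (l : List Char) (q : Char → Bool) :
    ((PySem.List.enumerate l 0).filter
      (fun p => !((PySem.List.slice l none (some p.1)).contains p.2) && q p.2)).map (·.2)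
    = (PySem.List.dedup l).filter q := by
  induction l using List.reverseRecOn with
  | nil => rfl
  | append_singleton l a ih =>
    rw [PySem.List.enumerate_append]
    rw [List.filter_append, List.map_append]
    have h1 : ((PySem.List.enumerate l 0).filter
        (fun p => !((PySem.List.slice (l ++ [a]) none (some p.1)).contains p.2) && q p.2)).map (·.2)
        = (PySem.List.dedup l).filter q := by
      rw [← ih]
      congr 1
      apply List.filter_congr
      intro p hp
      obtain ⟨k, hk, rfl⟩ := (PySem.List.mem_enumerate_iff _ _ _).mp hp
      have : PySem.List.slice (l ++ [a]) none (some ((0 : Int) + k)) =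
             PySem.List.slice l none (some ((0 : Int) + k)) := by
        have h0 : ((0 : Int) + k) = ((k : Int)) := by ring
        rw [h0, PySem.List.slice_to_natCast, PySem.List.slice_to_natCast,
            List.take_append_of_le_length (le_of_lt hk)]
      rw [this]
    rw [h1]
    by_cases hal : a ∈ l
    · have hdl : PySem.List.dedup (l ++ [a]) = PySem.List.dedup l := by
        simp only [PySem.List.dedup_eq_ofList, PySem.Set.ofList_append_singleton,
          PySem.Set.add_of_mem ((PySem.Set.mem_ofList _ _).mpr hal)]
      simp [PySem.List.enumerate, hal]
      simp only [PySem.List.dedup_eq_ofList] at hdl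
      rw [hdl]
    · have hdl : PySem.List.dedup (l ++ [a]) = PySem.List.dedup l ++ [a] := by
        simp only [PySem.List.dedup_eq_ofList, PySem.Set.ofList_append_singleton,
          PySem.Set.add_of_not_mem (fun h => hal ((PySem.Set.mem_ofList _ _).mp h))]
      rw [hdl, List.filter_append]
      have h3 : PySem.List.slice (l ++ [a]) none (some ((l.length : Nat) : Int)) = l := by
        rw [PySem.List.slice_to_natCast]; exact List.take_left
      simp [PySem.List.enumerate]
      by_cases hqa : q a = true <;> simp [hqa, h3, hal]

-- ===== VERDICT (by name: the statement is the Claim_ definition above) =====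
theorem get_group_priority_spec : Claim_equal_get_group_priority := by
  intro rucksacks _ hpre
  obtain ⟨hne, hcs⟩ := hpre
  obtain ⟨first, rest, rfl⟩ : ∃ f r, rucksacks = f :: r := by
    cases rucksacks with
    | nil => exact absurd rfl hne
    | cons f r => exact ⟨f, r, rfl⟩
  simp only [List.headD_cons] at hcs
  obtain ⟨hlen, -⟩ := hcs
  obtain ⟨c0, hc0⟩ := List.length_eq_one_iff.mp hlen
  have hmem : ∀ x : Char,
      (x ∈ first.toList ∧ ((first :: rest).all (fun r => r.toList.contains x)) = true) ↔ x = c0 := by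
    intro x
    have h1 : x ∈ (PySem.List.dedup first.toList).filter
        (fun c => (first :: rest).all (fun r => r.toList.contains c))
        ↔ x ∈ first.toList ∧ ((first :: rest).all (fun r => r.toList.contains x)) = true := by
      simp [List.mem_filter]
    rw [← h1, hc0]; simp
  show get_group_priority _ = get_group_priority_alt _
  -- A's side
  unfold get_group_priority
  simp only [List.foldl_cons]
  rw [pvFoldA]
  have hSeq : rest.foldl (fun t r => PySem.Set.inter t (PySem.Set.ofList r.toList))
      (PySem.Set.ofList first.toList) = [c0] := by
    apply pvNodupSingleton _ c0 (pvNodupFoldInter _ _ (PySem.Set.nodup_ofList _))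
    intro x
    rw [pvMemFoldInter, PySem.Set.mem_ofList, ← hmem x]
    simp only [List.all_cons, List.all_eq_true, Bool.and_eq_true,
      List.contains_eq_mem, decide_eq_true_eq]
    constructor
    · rintro ⟨h1, h2⟩; exact ⟨h1, ⟨h1, h2⟩⟩
    · rintro ⟨h1, _, h2⟩; exact ⟨h1, h2⟩
  rw [hSeq]
  -- B's side
  unfold get_group_priority_alt
  simp only [List.headD_cons]
  rw [pvCommonB first.toList (fun c => (first :: rest).all (fun r => r.toList.contains c))]
  rw [hc0]
  simp [PySem.Set.len]
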